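-- pv_equiv track=rewrite | github.com/nkukarl/lintcode | Q248 Count of Smaller Number.py | countOfSmallerNumber
-- ===== SOURCE A (Python) =====
-- def countOfSmallerNumber(nums, queries):
-- 	res = []
-- 	for q in queries:
-- 		counter = 0
-- 		for n in nums:
-- 			if n < q:
-- 				counter += 1
-- 		res.append(counter)
-- 	return res
-- ===== SOURCE B (Python) =====
-- def countOfSmallerNumber(nums, queries):
--     s = sorted(nums)
--     n = len(s)
--
--     def bisect_left(q):
--         lo, hi = 0, n
--         while lo < hi:
--             mid = (lo + hi) // 2
--             if s[mid] < q:
--                 lo = mid + 1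
--             else:
--                 hi = mid
--         return lo
--
--     return [bisect_left(q) for q in queries]
-- ===== Notes on version B (the rewrite author's own statement) =====
-- stated objective: faster
-- what changed: Replaces the per-query linear scan of nums with one upfront sort of nums and a hand-written binary search (bisect_left) per query.
import Mathlib
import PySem

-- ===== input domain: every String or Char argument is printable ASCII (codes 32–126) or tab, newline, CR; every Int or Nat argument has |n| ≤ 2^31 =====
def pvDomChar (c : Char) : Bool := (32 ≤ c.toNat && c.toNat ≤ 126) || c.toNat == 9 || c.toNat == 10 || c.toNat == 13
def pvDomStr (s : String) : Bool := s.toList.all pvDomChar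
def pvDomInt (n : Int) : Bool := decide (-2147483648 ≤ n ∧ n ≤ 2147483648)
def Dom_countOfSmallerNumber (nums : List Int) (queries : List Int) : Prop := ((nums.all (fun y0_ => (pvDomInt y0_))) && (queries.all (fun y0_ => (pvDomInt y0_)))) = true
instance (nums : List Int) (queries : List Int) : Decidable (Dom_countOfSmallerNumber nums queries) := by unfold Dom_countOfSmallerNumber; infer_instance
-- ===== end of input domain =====

-- B replaces A's per-query linear scan with one sort of nums plus a binary search per query (faster, asymptotically).

-- ===== PORT A =====
-- res = []; for q in queries: counter = 0; for n in nums: if n < q: counter += 1; res.append(counter)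
def countOfSmallerNumber (nums : List Int) (queries : List Int) : List Int :=
  queries.foldl
    (fun res q =>
      res ++ [nums.foldl (fun counter n => if n < q then counter + 1 else counter) 0])
    []

-- ===== PORT B =====
-- the while-loop of Source B's bisect_left; s[mid] ported as getD (exact: 0 ≤ lo ≤ mid < hi ≤ len s whenever read)
def bisectLoop (s : List Int) (q : Int) (lo hi : Nat) : Nat :=
  if _h : lo < hi then
    let mid := (lo + hi) / 2
    if s.getD mid 0 < q then bisectLoop s q (mid + 1) hi
    else bisectLoop s q lo mid
  else lo
termination_by hi - lo
decreasing_by all_goals omega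

def countOfSmallerNumber_alt (nums : List Int) (queries : List Int) : List Int :=
  let s := PySem.List.sorted nums (fun x => x) false
  let n := s.length
  queries.map (fun q => ((bisectLoop s q 0 n : Nat) : Int))

-- ===== PRECONDITION & SPEC =====
def Spec_countOfSmallerNumber (nums : List Int) (queries : List Int) (out : List Int) : Prop := out = countOfSmallerNumber_alt nums queries
instance (nums : List Int) (queries : List Int) (out : List Int) : Decidable (Spec_countOfSmallerNumber nums queries out) := by unfold Spec_countOfSmallerNumber; infer_instance

-- ===== CLAIM (what is proved, stated in full; the proofs are below) =====
def Claim_equal_countOfSmallerNumber : Prop := ∀ (nums : List Int) (queries : List Int), Dom_countOfSmallerNumber nums queries → Spec_countOfSmallerNumber nums queries (countOfSmallerNumber nums queries)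

-- ===== LEMMAS AND PROOFS =====

-- in a sorted list, an element is < q exactly when its index is below the count of elements < q
lemma sorted_lt_iff_idx_lt_count (s : List Int) (q : Int)
    (hs : s.Pairwise (· ≤ ·)) :
    ∀ i, (hi : i < s.length) → (s[i] < q ↔ i < s.countP (fun n => decide (n < q))) := by
  induction s with
  | nil => intro i hi; simp at hi
  | cons a t ih =>
    rcases List.pairwise_cons.mp hs with ⟨ha, ht⟩
    intro i hi
    cases i with
    | zero =>
      simp only [List.getElem_cons_zero, List.countP_cons]
      constructor
      · intro h; simp [h]
      · intro h
        by_contra hna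
        have h0 : t.countP (fun n => decide (n < q)) = 0 := by
          rw [List.countP_eq_zero]
          intro x hx
          simp only [decide_eq_true_eq]
          exact fun hlt => hna (lt_of_le_of_lt (ha x hx) hlt)
        simp [h0, hna] at h
    | succ j =>
      simp only [List.getElem_cons_succ, List.countP_cons]
      have hj : j < t.length := by simpa using hi
      have := ih ht j hj
      by_cases haq : a < q
      · simp [haq] at this ⊢; omega
      · have h0 : t.countP (fun n => decide (n < q)) = 0 := by
          rw [List.countP_eq_zero]
          intro x hx
          simp only [decide_eq_true_eq]
          exact fun hlt => haq (lt_of_le_of_lt (ha x hx) hlt)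
        simp [haq, h0] at this ⊢
        omega

lemma bisectLoop_eq_count (s : List Int) (q : Int)
    (hs : s.Pairwise (· ≤ ·)) :
    ∀ lo hi, lo ≤ s.countP (fun n => decide (n < q)) →
      s.countP (fun n => decide (n < q)) ≤ hi → hi ≤ s.length →
      bisectLoop s q lo hi = s.countP (fun n => decide (n < q)) := by
  intro lo hi
  induction lo, hi using bisectLoop.induct s q with
  | case1 lo hi h mid hm ih =>
    intro hlo hhi hlen
    have hmid : (lo + hi) / 2 < s.length := by omega
    have hg : s.getD ((lo + hi) / 2) 0 = s[(lo + hi) / 2] := by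
      simp [List.getD_eq_getElem?_getD, List.getElem?_eq_getElem hmid]
    have hlt : (lo + hi) / 2 < s.countP (fun n => decide (n < q)) :=
      (sorted_lt_iff_idx_lt_count s q hs _ hmid).mp (hg ▸ hm)
    rw [bisectLoop]
    simp only [dif_pos h]
    rw [if_pos (show s.getD ((lo + hi) / 2) 0 < q from hm)]
    exact ih (by omega) hhi hlen
  | case2 lo hi h mid hm ih =>
    intro hlo hhi hlen
    have hmid : (lo + hi) / 2 < s.length := by omega
    have hg : s.getD ((lo + hi) / 2) 0 = s[(lo + hi) / 2] := by
      simp [List.getD_eq_getElem?_getD, List.getElem?_eq_getElem hmid]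
    have hge : ¬ (lo + hi) / 2 < s.countP (fun n => decide (n < q)) := fun hc =>
      hm (hg ▸ (sorted_lt_iff_idx_lt_count s q hs _ hmid).mpr hc)
    rw [bisectLoop]
    simp only [dif_pos h]
    rw [if_neg (show ¬ s.getD ((lo + hi) / 2) 0 < q from hm)]
    exact ih hlo (by omega) (by omega)
  | case3 lo hi h =>
    intro hlo hhi _
    rw [bisectLoop]
    simp only [dif_neg h]
    omega

-- ===== VERDICT (by name: the statement is the Claim_ definition above) =====
theorem countOfSmallerNumber_spec : Claim_equal_countOfSmallerNumber := by
  intro nums queries _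
  unfold Spec_countOfSmallerNumber countOfSmallerNumber countOfSmallerNumber_alt
  rw [PySem.List.foldl_append_singleton_eq_map, List.nil_append]
  apply List.map_congr_left
  intro q _
  set s := PySem.List.sorted nums (fun x => x) false with hsdef
  have hperm : s.Perm nums := PySem.List.sorted_perm nums (fun x => x) false
  have hpw : s.Pairwise (· ≤ ·) := by
    simpa using PySem.List.sorted_pairwise nums (fun x => x)
  have hc : s.countP (fun n => decide (n < q)) = nums.countP (fun n => decide (n < q)) :=
    hperm.countP_eq _
  have hfold := PySem.List.foldl_count_if (fun n => decide (n < q)) nums 0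
  simp only [decide_eq_true_eq] at hfold
  rw [hfold]
  rw [bisectLoop_eq_count s q hpw 0 s.length
    (by omega) List.countP_le_length (le_refl _), hc]
  simp
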